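-- pv_equiv track=rewrite | github.com/ContextLab/CDL-bibliography | bibcheck/helpers.py | remove_non_letters
-- ===== SOURCE A (Python) =====
-- def remove_non_letters(s):
--     remove_chars = [
--         ",",
--         ".",
--         "!",
--         "?",
--         "'",
--         '"',
--         "{",
--         "}",
--         "-",
--         "\\",
--         ":",
--         "(",
--         ")",
--         "[",
--         "]",
--         "+",
--         "/",
--         "*",
--     ]
--     for c in remove_chars:
--         s = s.replace(c, "")
--     return s
-- ===== SOURCE B (Python) =====
-- def remove_non_letters(s):
--     remove_set = {
--         ",", ".", "!", "?", "'", '"', "{", "}", "-", "\\",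
--         ":", "(", ")", "[", "]", "+", "/", "*",
--     }
--     return "".join(c for c in s if c not in remove_set)
-- ===== Notes on version B (the rewrite author's own statement) =====
-- stated objective: simpler
-- what changed: Replaced 18 sequential whole-string s.replace passes by a single pass over the input filtering against a precomputed set of the removal characters.
import Mathlib
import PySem

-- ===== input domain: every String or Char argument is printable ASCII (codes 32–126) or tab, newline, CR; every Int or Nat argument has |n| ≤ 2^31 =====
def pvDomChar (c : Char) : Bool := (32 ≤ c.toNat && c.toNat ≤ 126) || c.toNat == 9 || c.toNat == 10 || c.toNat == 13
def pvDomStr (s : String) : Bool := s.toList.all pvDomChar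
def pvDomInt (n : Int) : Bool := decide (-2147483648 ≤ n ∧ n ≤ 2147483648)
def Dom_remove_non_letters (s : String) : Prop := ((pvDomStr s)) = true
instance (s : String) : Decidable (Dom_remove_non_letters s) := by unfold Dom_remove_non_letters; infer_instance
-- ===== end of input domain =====

-- B makes a single filtering pass over the input with a set of the 18 removal characters instead of A's 18 sequential whole-string replace passes (simpler; not claimed faster).

-- ===== PORT A =====
def remove_non_letters (s : String) : String :=
  let remove_chars : List String :=
    [",", ".", "!", "?", "'", "\"", "{", "}", "-", "\\",
     ":", "(", ")", "[", "]", "+", "/", "*"]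
  remove_chars.foldl (fun s c => PySem.Str.replace s c "") s

-- ===== PORT B =====
def remove_non_letters_alt (s : String) : String :=
  let remove_set : PySem.Set Char :=
    PySem.Set.ofList [',', '.', '!', '?', '\'', '"', '{', '}', '-', '\\',
                      ':', '(', ')', '[', ']', '+', '/', '*']
  String.ofList (s.toList.filter (fun c => !(remove_set.contains c)))

-- ===== PRECONDITION & SPEC =====
def Spec_remove_non_letters (s : String) (out : String) : Prop := out = remove_non_letters_alt s
instance (s : String) (out : String) : Decidable (Spec_remove_non_letters s out) := by unfold Spec_remove_non_letters; infer_instance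

-- ===== CLAIM (what is proved, stated in full; the proofs are below) =====
def Claim_equal_remove_non_letters : Prop := ∀ (s : String), Dom_remove_non_letters s → Spec_remove_non_letters s (remove_non_letters s)

-- ===== LEMMAS AND PROOFS =====

-- replace.go for a one-character pattern and empty replacement is a filter
theorem replace_go_filter (c : Char) (l acc : List Char) (fuel : Nat) (h : l.length ≤ fuel) :
    PySem.Chars.replace.go [c] [] fuel l acc = acc.reverse ++ l.filter (fun x => x != c) := by
  induction l generalizing fuel acc with
  | nil => cases fuel <;> simp [PySem.Chars.replace.go]
  | cons c' t ih =>
    cases fuel with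
    | zero => simp at h
    | succ n =>
      simp only [List.length_cons, Nat.succ_le_succ_iff] at h
      by_cases hc : c' = c
      · subst hc
        rw [PySem.Chars.replace.go]
        simp only [List.isPrefixOf, BEq.rfl, Bool.true_and, if_true]
        rw [show List.drop [c'].length (c' :: t) = t from rfl]
        rw [ih _ _ h]
        simp
      · rw [PySem.Chars.replace.go]
        have : ([c].isPrefixOf (c' :: t)) = false := by
          simp [List.isPrefixOf]
          exact fun h' => absurd h'.symm hc
        rw [this]
        simp only [if_false, Bool.false_eq_true]
        rw [ih _ _ h]
        simp [hc]

-- replacing a single character by "" filters it out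
theorem replace_one_filter (c : Char) (l : List Char) :
    PySem.Chars.replace l [c] [] = l.filter (fun x => x != c) := by
  rw [PySem.Chars.replace]
  simp only [List.isEmpty_cons, if_false, Bool.false_eq_true]
  exact replace_go_filter c l [] l.length le_rfl

-- a fold of single-character filters is one filter with a membership test
theorem foldl_filter_contains (cs : List Char) (t : List Char) :
    cs.foldl (fun t c => t.filter (fun x => x != c)) t
      = t.filter (fun x => !(cs.contains x)) := by
  induction cs generalizing t with
  | nil => simp
  | cons c cs ih =>
    simp only [List.foldl_cons, ih, List.filter_filter]
    apply List.filter_congr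
    intro x _
    by_cases h : x = c <;> simp [h]

theorem remove_non_letters_spec : Claim_equal_remove_non_letters := by
  intro s _
  unfold Spec_remove_non_letters remove_non_letters remove_non_letters_alt
  apply String.ext
  -- move A's fold to the list side
  have hfold : ∀ (cs : List Char) (s : String),
      (List.foldl (fun s c => PySem.Str.replace s (String.ofList [c]) "") s cs).toList
        = List.foldl (fun t c => t.filter (fun x => x != c)) s.toList cs := by
    intro cs
    induction cs with
    | nil => intro s; rfl
    | cons c cs ih =>
      intro s
      simp only [List.foldl_cons, ih]
      congr 1
      rw [PySem.Str.toList_replace]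
      simp only [String.toList_ofList]
      exact replace_one_filter c s.toList
  show (List.foldl (fun s c => PySem.Str.replace s c "") s
      [",", ".", "!", "?", "'", "\"", "{", "}", "-", "\\",
       ":", "(", ")", "[", "]", "+", "/", "*"]).toList = _
  have := hfold [',', '.', '!', '?', '\'', '"', '{', '}', '-', '\\',
                 ':', '(', ')', '[', ']', '+', '/', '*'] s
  rw [show ([",", ".", "!", "?", "'", "\"", "{", "}", "-", "\\",
       ":", "(", ")", "[", "]", "+", "/", "*"] : List String)
      = [',', '.', '!', '?', '\'', '"', '{', '}', '-', '\\',
         ':', '(', ')', '[', ']', '+', '/', '*'].map (fun c => String.ofList [c]) from rfl]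
  rw [List.foldl_map, this, foldl_filter_contains]
  simp [PySem.Set.ofList]
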